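/- GENERATED by farm/mkstatement.py from design/units.tsv (unit `vorbis_decode_packet_rest.5c`) and the assertions of Vorbis/Spec/PacketRest5.lean — do not edit.
   THE STATEMENT of the proof unit `vorbis_decode_packet_rest.5c`: segment 5c of `vorbis_decode_packet_rest` (62 instructions; entries 0x1111a6;
   exits 0x11109c; ranges 0x1111a6-0x111260 + 0x11104c-0x111098)
   takes each of its entry assertions to one of its exit assertions (`Vorbis.Spec.vorbis_decode_packet_rest.Seg5c`), given the contracts of its callees.
   What the names mean: Vorbis/Spec/Basic.lean (the shared hypotheses), Vorbis/Spec/PacketRest5.lean (the assertions). The theorem to prove: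
   `theorem vorbis_decode_packet_rest_5c_ok : Vorbis.Spec.vorbis_decode_packet_rest_5c.Statement`. -/
import Vorbis.Spec.PacketRest5
namespace Vorbis.Spec.vorbis_decode_packet_rest_5c
open X86 X86.User Asan

/-- The statement of unit `vorbis_decode_packet_rest.5c`. -/
def Statement : Prop :=
  ∀ (Lay : Layout) (_hLay : Lay.hi = 0x1000000) (μ : Microarch) (_hμ : UserX.MicroOK μ) (u₀ : State)
    (_hcode : HasCodeNat Lay u₀ Vorbis.L.vorbis_decode_packet_rest.entry Vorbis.Code.code_vorbis_decode_packet_rest.nat Vorbis.L.vorbis_decode_packet_rest.size)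
    (_h_asan_store1_noabort : Asan.SmallCheck Lay μ Vorbis.WayInv (Vorbis.CodeOK u₀) [.rax, .rdx] 1 Vorbis.L.__asan_store1_noabort.entry)
    (_h_asan_load2_noabort : Asan.SmallCheck Lay μ Vorbis.WayInv (Vorbis.CodeOK u₀) [.rax, .rcx, .rdx] 2 Vorbis.L.__asan_load2_noabort.entry),
    Vorbis.Spec.vorbis_decode_packet_rest.Seg5c Lay μ u₀

end Vorbis.Spec.vorbis_decode_packet_rest_5c
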